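-- pv_equiv track=rewrite | github.com/stochastic-sisyphus/Portfolio | Data-Science-and-Analysis/dna-analysis/genetic-dna-analysis.py | _validate_genotype
-- ===== SOURCE A (Python) =====
-- def _validate_genotype(genotype: str) -> bool:
--     """Validate genotype format and content"""
--     # Accept -- for no-calls
--     if genotype == '--':
--         return True
--
--     # Accept D, I, DD, II, and DI for structural variants
--     if genotype in {'D', 'I', 'DD', 'II', 'DI'}:
--         return True
--
--     # For standard nucleotides, check length and valid bases
--     if len(genotype) not in [1, 2]:
--         return False
--
--     return all(base in {'A', 'C', 'G', 'T'} for base in genotype)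
-- ===== SOURCE B (Python) =====
-- VALID = {'--', 'D', 'I', 'DD', 'II', 'DI'} | set('ACGT') | {a + b for a in 'ACGT' for b in 'ACGT'}
--
--
-- def _validate_genotype(genotype: str) -> bool:
--     """Validate genotype format and content by lookup in the precomputed table."""
--     return genotype in VALID
-- ===== Notes on version B (the rewrite author's own statement) =====
-- stated objective: simpler
-- what changed: Replaced the staged guard/branch/per-character-scan decomposition with a single membership test against a precomputed finite set of all 26 valid genotypes (the six literals, four single bases, and the 16 two-base combinations).
import Mathlib
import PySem

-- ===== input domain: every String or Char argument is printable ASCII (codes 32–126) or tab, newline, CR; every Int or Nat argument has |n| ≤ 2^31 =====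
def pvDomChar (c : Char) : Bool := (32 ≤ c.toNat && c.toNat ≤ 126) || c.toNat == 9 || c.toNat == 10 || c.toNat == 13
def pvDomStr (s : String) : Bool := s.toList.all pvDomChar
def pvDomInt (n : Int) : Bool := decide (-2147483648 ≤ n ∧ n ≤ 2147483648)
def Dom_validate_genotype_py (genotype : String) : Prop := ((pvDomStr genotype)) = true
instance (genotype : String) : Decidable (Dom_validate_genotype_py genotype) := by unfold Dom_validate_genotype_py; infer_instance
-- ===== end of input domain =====

-- B replaces A's staged branches plus per-character scan by one membership test against a precomputed table of all 26 valid genotypes (objective: simpler).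


-- ===== PORT A =====
def validate_genotype_py (genotype : String) : Bool :=
  if genotype == "--" then true
  else if ["D", "I", "DD", "II", "DI"].contains genotype then true
  else if !([(1 : Int), 2].contains (PySem.Str.len genotype)) then false
  else genotype.toList.all (fun base => ['A', 'C', 'G', 'T'].contains base)

-- ===== PORT B =====
-- the precomputed table: the six literals, the four single bases, and all 16 two-base strings
def pvValidTable : List String :=
  ["--", "D", "I", "DD", "II", "DI"] ++ ['A', 'C', 'G', 'T'].map (fun a => String.ofList [a])
    ++ (['A', 'C', 'G', 'T'].flatMap fun a => ['A', 'C', 'G', 'T'].map fun b => String.ofList [a, b])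

def validate_genotype_py_alt (genotype : String) : Bool :=
  pvValidTable.contains genotype


-- ===== PRECONDITION & SPEC =====
def Spec_validate_genotype_py (genotype : String) (out : Bool) : Prop := out = validate_genotype_py_alt genotype
instance (genotype : String) (out : Bool) : Decidable (Spec_validate_genotype_py genotype out) := by unfold Spec_validate_genotype_py; infer_instance

-- ===== CLAIM (what is proved, stated in full; the proofs are below) =====
def Claim_equal_validate_genotype_py : Prop := ∀ (genotype : String), Dom_validate_genotype_py genotype → Spec_validate_genotype_py genotype (validate_genotype_py genotype)

-- ===== LEMMAS AND PROOFS =====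

theorem pv_mem_table (l : List Char) :
    String.ofList l ∈ pvValidTable ↔
      (l = ['-','-'] ∨ l = ['D'] ∨ l = ['I'] ∨ l = ['D','D'] ∨ l = ['I','I'] ∨ l = ['D','I']) ∨
      (∃ a, (a = 'A' ∨ a = 'C' ∨ a = 'G' ∨ a = 'T') ∧ l = [a]) ∨
      (∃ a, (a = 'A' ∨ a = 'C' ∨ a = 'G' ∨ a = 'T') ∧ ∃ b, (b = 'A' ∨ b = 'C' ∨ b = 'G' ∨ b = 'T') ∧ l = [a, b]) := by
  have e1 : ("--" : String) = .ofList ['-','-'] := rfl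
  have e2 : ("D" : String) = .ofList ['D'] := rfl
  have e3 : ("I" : String) = .ofList ['I'] := rfl
  have e4 : ("DD" : String) = .ofList ['D','D'] := rfl
  have e5 : ("II" : String) = .ofList ['I','I'] := rfl
  have e6 : ("DI" : String) = .ofList ['D','I'] := rfl
  simp only [pvValidTable, List.mem_append, List.mem_map, List.mem_flatMap, List.mem_cons,
    List.not_mem_nil, e1, e2, e3, e4, e5, e6, String.ofList_inj, or_false]
  constructor
  · rintro ((h | ⟨a, ha, h⟩) | ⟨a, ha, b, hb, h⟩)
    · exact Or.inl h
    · exact Or.inr (Or.inl ⟨a, ha, h.symm⟩)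
    · exact Or.inr (Or.inr ⟨a, ha, b, hb, h.symm⟩)
  · rintro (h | ⟨a, ha, rfl⟩ | ⟨a, ha, b, hb, rfl⟩)
    · exact Or.inl (Or.inl h)
    · exact Or.inl (Or.inr ⟨a, ha, rfl⟩)
    · exact Or.inr ⟨a, ha, b, hb, rfl⟩

theorem pv_main (l : List Char) :
    validate_genotype_py (String.ofList l) = validate_genotype_py_alt (String.ofList l) := by
  have e1 : ("--" : String) = .ofList ['-','-'] := rfl
  have e2 : ("D" : String) = .ofList ['D'] := rfl
  have e3 : ("I" : String) = .ofList ['I'] := rfl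
  have e4 : ("DD" : String) = .ofList ['D','D'] := rfl
  have e5 : ("II" : String) = .ofList ['I','I'] := rfl
  have e6 : ("DI" : String) = .ofList ['D','I'] := rfl
  rw [Bool.eq_iff_iff]
  have halt : validate_genotype_py_alt (String.ofList l) = true ↔ String.ofList l ∈ pvValidTable := by
    simp [validate_genotype_py_alt]
  rw [halt, pv_mem_table]
  simp only [validate_genotype_py, beq_iff_eq, e1, e2, e3, e4, e5, e6, String.ofList_inj,
    List.contains_eq_mem, List.mem_cons, List.not_mem_nil, or_false, PySem.Str.len_eq,
    String.toList_ofList, decide_eq_true_eq]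
  split_ifs with h1 h2 h3
  · simp only [true_iff]
    exact Or.inl (Or.inl h1)
  · simp only [true_iff]
    exact Or.inl (Or.inr h2)
  · simp only [false_iff]
    rintro ((rfl|rfl|rfl|rfl|rfl|rfl) | ⟨a, ha, rfl⟩ | ⟨a, ha, b, hb, rfl⟩) <;> simp_all
  · rcases l with _ | ⟨a, _ | ⟨b, _ | ⟨c, t⟩⟩⟩
    · simp_all
    · simp_all only [List.all_cons, List.all_nil, Bool.and_true, List.contains_eq_mem,
        List.mem_cons, List.not_mem_nil, or_false, decide_eq_true_eq]
      constructor
      · intro h; exact Or.inr (Or.inl ⟨a, h, rfl⟩)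
      · rintro ((h|h|h|h|h|h) | ⟨x, hx, h⟩ | ⟨x, hx, y, hy, h⟩) <;> simp_all
    · simp_all only [List.all_cons, List.all_nil, Bool.and_true, List.contains_eq_mem,
        List.mem_cons, List.not_mem_nil, or_false, decide_eq_true_eq, Bool.and_eq_true]
      constructor
      · rintro ⟨ha, hb⟩; exact Or.inr (Or.inr ⟨a, ha, b, hb, rfl⟩)
      · rintro ((h|h|h|h|h|h) | ⟨x, hx, h⟩ | ⟨x, hx, y, hy, h⟩) <;> simp_all
    · exfalso
      exact h3 (by simp; omega)

-- ===== VERDICT (by name: the statement is the Claim_ definition above) =====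
theorem validate_genotype_py_spec : Claim_equal_validate_genotype_py := by
  intro g _
  unfold Spec_validate_genotype_py
  have h := pv_main g.toList
  rw [String.ofList_toList] at h
  exact h
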